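-- pv_equiv track=rewrite | github.com/20222073yyh/20222073_-_- | 2.py | solution
-- ===== SOURCE A (Python) =====
-- def solution(letter):
--
--    if 1<= len(letter) <= 1000:#letter의 길이제한
--     morse = {'.-':'a','-...':'b','-.-.':'c','-..':'d','.':'e','..-.':'f',
--              '--.':'g','....':'h','..':'i','.---':'j','-.-':'k','.-..':'l',
--              '--':'m','-.':'n','---':'o','.--.':'p','--.-':'q','.-.':'r',
--              '...':'s','-':'t','..-':'u','...-':'v','.--':'w','-..-':'x',
--              '-.--':'y','--..':'z'}
--
--     answer = ''
--
--     for code in letter.split(' '): #letter를 공백을 기준으로 나누어서 각각의 Morse 코드로 분리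
--         if code in morse: #mores 코드가 있는지 확인
--             answer += morse[code] #코드가 있으면 대응 하는 알파벳생김
--         else:
--             answer += ' ' #없으면 빈칸
--
--     return answer
-- ===== SOURCE B (Python) =====
-- def _insert(node, code, ch):
--     if node is None:
--         node = (None, None, None)
--     lbl, dot, dash = node
--     if code == '':
--         return (ch, dot, dash)
--     if code[0] == '.':
--         return (lbl, _insert(dot, code[1:], ch), dash)
--     else:
--         return (lbl, dot, _insert(dash, code[1:], ch))
--
--
-- _PAIRS = [('.-', 'a'), ('-...', 'b'), ('-.-.', 'c'), ('-..', 'd'), ('.', 'e'),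
--           ('..-.', 'f'), ('--.', 'g'), ('....', 'h'), ('..', 'i'), ('.---', 'j'),
--           ('-.-', 'k'), ('.-..', 'l'), ('--', 'm'), ('-.', 'n'), ('---', 'o'),
--           ('.--.', 'p'), ('--.-', 'q'), ('.-.', 'r'), ('...', 's'), ('-', 't'),
--           ('..-', 'u'), ('...-', 'v'), ('.--', 'w'), ('-..-', 'x'),
--           ('-.--', 'y'), ('--..', 'z')]
--
-- _TRIE = None
-- for _c, _l in _PAIRS:
--     _TRIE = _insert(_TRIE, _c, _l)
--
--
-- def _decode(node, code):
--     if node is None: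
--         return None
--     if code == '':
--         return node[0]
--     if code[0] == '.':
--         return _decode(node[1], code[1:])
--     if code[0] == '-':
--         return _decode(node[2], code[1:])
--     return None
--
--
-- def solution(letter):
--     if 1 <= len(letter) <= 1000:
--         out = []
--         for code in letter.split(' '):
--             d = _decode(_TRIE, code)
--             out.append(d if d is not None else ' ')
--         return ''.join(out)
-- ===== Notes on version B (the rewrite author's own statement) =====
-- stated objective: alternative
-- what changed: Pre_ excludes lengths 0 and >1000, where A falls through its guard and returns None (not a str); B replaces A's per-token dictionary membership test + lookup with a Morse binary trie built once from the code table and walked character by character ('.' = left child, '-' = right child) for each token, collecting pieces in a list joined at the end.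
-- outside the precondition, e.g. on solution(''): A returns None, B returns None
import Mathlib
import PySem

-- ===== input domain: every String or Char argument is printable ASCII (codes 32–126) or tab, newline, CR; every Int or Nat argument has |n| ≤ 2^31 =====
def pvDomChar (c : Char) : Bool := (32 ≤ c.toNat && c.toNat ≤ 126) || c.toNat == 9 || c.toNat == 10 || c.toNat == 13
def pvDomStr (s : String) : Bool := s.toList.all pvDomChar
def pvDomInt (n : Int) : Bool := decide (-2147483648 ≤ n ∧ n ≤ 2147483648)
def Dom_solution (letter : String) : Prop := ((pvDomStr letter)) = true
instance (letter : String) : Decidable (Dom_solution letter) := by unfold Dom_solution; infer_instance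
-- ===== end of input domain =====

-- B replaces A's per-token dict membership+lookup with a Morse binary trie built once
-- and walked char by char per token (objective: alternative data structure, same cost).

-- ===== PORT A =====
def morseDict : PySem.Dict String String := PySem.Dict.ofList
  [(".-","a"),("-...","b"),("-.-.","c"),("-..","d"),(".","e"),("..-.","f"),
   ("--.","g"),("....","h"),("..","i"),(".---","j"),("-.-","k"),(".-..","l"),
   ("--","m"),("-.","n"),("---","o"),(".--.","p"),("--.-","q"),(".-.","r"),
   ("...","s"),("-","t"),("..-","u"),("...-","v"),(".--","w"),("-..-","x"),
   ("-.--","y"),("--..","z")]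

-- Python returns None (no String) when len(letter) is outside 1..1000; those inputs are excluded by Pre_solution.
def solution (letter : String) : String :=
  if 1 ≤ PySem.Str.len letter ∧ PySem.Str.len letter ≤ 1000 then
    ((PySem.Str.split? letter " ").getD []).foldl
      (fun answer code =>
        if morseDict.contains code then answer ++ morseDict.getD code "" else answer ++ " ") ""
  else ""

-- ===== PORT B =====
inductive Trie : Type
  | nil : Trie
  | node : Option String → Trie → Trie → Trie
deriving DecidableEq, Repr

def trieInsert (t : Trie) (code : List Char) (ch : String) : Trie :=
  -- Python's `_insert`: a missing node is first materialised as an empty node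
  match (match t with | Trie.nil => (none, Trie.nil, Trie.nil) | Trie.node l d e => (l, d, e)) with
  | (lbl, dot, dash) =>
    match code with
    | [] => Trie.node (some ch) dot dash
    | c :: rest =>
      if c = '.' then Trie.node lbl (trieInsert dot rest ch) dash
      else Trie.node lbl dot (trieInsert dash rest ch)

def morsePairs : List (String × String) :=
  [(".-","a"),("-...","b"),("-.-.","c"),("-..","d"),(".","e"),("..-.","f"),
   ("--.","g"),("....","h"),("..","i"),(".---","j"),("-.-","k"),(".-..","l"),
   ("--","m"),("-.","n"),("---","o"),(".--.","p"),("--.-","q"),(".-.","r"),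
   ("...","s"),("-","t"),("..-","u"),("...-","v"),(".--","w"),("-..-","x"),
   ("-.--","y"),("--..","z")]

def morseTrie : Trie := morsePairs.foldl (fun t p => trieInsert t p.1.toList p.2) Trie.nil

def trieDecode : Trie → List Char → Option String
  | Trie.nil, _ => none
  | Trie.node lbl _ _, [] => lbl
  | Trie.node _ d e, c :: rest =>
    if c = '.' then trieDecode d rest
    else if c = '-' then trieDecode e rest
    else none

def solution_alt (letter : String) : String :=
  if 1 ≤ PySem.Str.len letter ∧ PySem.Str.len letter ≤ 1000 then
    PySem.Str.join "" (((PySem.Str.split? letter " ").getD []).foldl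
      (fun out code => out ++ [(trieDecode morseTrie code.toList).getD " "]) [])
  else ""

-- ===== PRECONDITION & SPEC =====
-- Pre_ excludes exactly the lengths (0 or > 1000) on which Python's A falls through and returns None, which is not a str.
def Pre_solution (letter : String) : Prop :=
  1 ≤ PySem.Str.len letter ∧ PySem.Str.len letter ≤ 1000
instance (letter : String) : Decidable (Pre_solution letter) := by unfold Pre_solution; infer_instance

def pvWitness_solution : String := ".- -... .."

def Spec_solution (letter : String) (out : String) : Prop := out = solution_alt letter
instance (letter : String) (out : String) : Decidable (Spec_solution letter out) := by unfold Spec_solution; infer_instance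

-- ===== CLAIM (what is proved, stated in full; the proofs are below) =====
def Claim_equal_solution : Prop := ∀ (letter : String), Dom_solution letter → Pre_solution letter → Spec_solution letter (solution letter)

-- ===== LEMMAS AND PROOFS =====
def trieHeight : Trie → Nat
  | Trie.nil => 0
  | Trie.node _ d e => max (trieHeight d) (trieHeight e) + 1

lemma trieDecode_of_height_le : ∀ (t : Trie) (cs : List Char),
    trieHeight t ≤ cs.length → trieDecode t cs = none := by
  intro t
  induction t with
  | nil => intro cs _; rfl
  | node lbl d e ihd ihe =>
    intro cs h
    cases cs with
    | nil => simp [trieHeight] at h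
    | cons c rest =>
      simp only [trieHeight, List.length_cons] at h
      simp only [trieDecode]
      split_ifs with h1 h2
      · exact ihd rest (by omega)
      · exact ihe rest (by omega)
      · rfl

lemma morse_items : morseDict.items =
  [(".-","a"),("-...","b"),("-.-.","c"),("-..","d"),(".","e"),("..-.","f"),
   ("--.","g"),("....","h"),("..","i"),(".---","j"),("-.-","k"),(".-..","l"),
   ("--","m"),("-.","n"),("---","o"),(".--.","p"),("--.-","q"),(".-.","r"),
   ("...","s"),("-","t"),("..-","u"),("...-","v"),(".--","w"),("-..-","x"),
   ("-.--","y"),("--..","z")] := by decide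

lemma sbeq (s t : String) : (s == t) = (s.toList == t.toList) := by
  rcases Bool.eq_false_or_eq_true (s == t) with h | h <;>
    rcases Bool.eq_false_or_eq_true (s.toList == t.toList) with h2 | h2 <;>
    simp_all [String.ext_iff]

-- the trie that B's build loop produces, pre-evaluated once
lemma morseTrie_eq : morseTrie =
  Trie.node none
    (Trie.node (some "e")
      (Trie.node (some "i")
        (Trie.node (some "s") (Trie.node (some "h") Trie.nil Trie.nil) (Trie.node (some "v") Trie.nil Trie.nil))
        (Trie.node (some "u") (Trie.node (some "f") Trie.nil Trie.nil) Trie.nil))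
      (Trie.node (some "a")
        (Trie.node (some "r") (Trie.node (some "l") Trie.nil Trie.nil) Trie.nil)
        (Trie.node (some "w") (Trie.node (some "p") Trie.nil Trie.nil) (Trie.node (some "j") Trie.nil Trie.nil))))
    (Trie.node (some "t")
      (Trie.node (some "n")
        (Trie.node (some "d") (Trie.node (some "b") Trie.nil Trie.nil) (Trie.node (some "x") Trie.nil Trie.nil))
        (Trie.node (some "k") (Trie.node (some "c") Trie.nil Trie.nil) (Trie.node (some "y") Trie.nil Trie.nil)))
      (Trie.node (some "m")
        (Trie.node (some "g") (Trie.node (some "z") Trie.nil Trie.nil) (Trie.node (some "q") Trie.nil Trie.nil))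
        (Trie.node (some "o") Trie.nil Trie.nil))) := by decide

-- the per-token equivalence: A's dict lookup = B's trie walk
set_option maxHeartbeats 2000000 in
lemma piece_eq (cs : List Char) :
    (if morseDict.contains (String.ofList cs) then morseDict.getD (String.ofList cs) "" else " ")
      = (trieDecode morseTrie cs).getD " " := by
  rcases cs with _ | ⟨a, _ | ⟨b, _ | ⟨c, _ | ⟨d, _ | ⟨e, r⟩⟩⟩⟩⟩
  · decide
  · by_cases ha : a = '.' <;> by_cases ha2 : a = '-' <;>
      first
        | (subst_vars; decide)
        | (simp_all [PySem.Dict.contains, PySem.Dict.getD, PySem.Dict.get?, morse_items, sbeq,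
              morseTrie_eq, trieDecode];
           try simp_all [@eq_comm Char])
  · by_cases ha : a = '.' <;> by_cases ha2 : a = '-' <;>
      by_cases hb : b = '.' <;> by_cases hb2 : b = '-' <;>
      first
        | (subst_vars; decide)
        | (simp_all [PySem.Dict.contains, PySem.Dict.getD, PySem.Dict.get?, morse_items, sbeq,
              morseTrie_eq, trieDecode];
           try simp_all [@eq_comm Char])
  · by_cases ha : a = '.' <;> by_cases ha2 : a = '-' <;>
      by_cases hb : b = '.' <;> by_cases hb2 : b = '-' <;>
      by_cases hc : c = '.' <;> by_cases hc2 : c = '-' <;>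
      first
        | (subst_vars; decide)
        | (simp_all [PySem.Dict.contains, PySem.Dict.getD, PySem.Dict.get?, morse_items, sbeq,
              morseTrie_eq, trieDecode];
           try simp_all [@eq_comm Char])
  · by_cases ha : a = '.' <;> by_cases ha2 : a = '-' <;>
      by_cases hb : b = '.' <;> by_cases hb2 : b = '-' <;>
      by_cases hc : c = '.' <;> by_cases hc2 : c = '-' <;>
      by_cases hd : d = '.' <;> by_cases hd2 : d = '-' <;>
      first
        | (subst_vars; decide)
        | (simp_all [PySem.Dict.contains, PySem.Dict.getD, PySem.Dict.get?, morse_items, sbeq,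
              morseTrie_eq, trieDecode];
           try simp_all [@eq_comm Char])
  · -- tokens of length ≥ 5: the dict has no such key and the walk falls off the trie
    rw [trieDecode_of_height_le morseTrie (a::b::c::d::e::r)
        (by simp only [List.length_cons, show trieHeight morseTrie = 5 from by decide]; omega)]
    simp [PySem.Dict.contains, morse_items, sbeq]

lemma flat_inter (xs : List (List Char)) :
    (List.intersperse ([] : List Char) xs).flatten = xs.flatten := by
  induction xs with
  | nil => rfl
  | cons a l ih =>
    cases l with
    | nil => rfl
    | cons b m => simp_all [List.intersperse]

lemma join_empty_cons (x : String) (l : List String) :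
    PySem.Str.join "" (x :: l) = x ++ PySem.Str.join "" l := by
  simp [PySem.Str.join, PySem.Chars.join, List.intercalate, flat_inter, String.ofList_append,
    String.ofList_toList]

lemma foldl_append_eq_join (f : String → String) :
    ∀ (ts : List String) (s : String),
      ts.foldl (fun a c => a ++ f c) s = s ++ PySem.Str.join "" (ts.map f) := by
  intro ts
  induction ts with
  | nil => intro s; simp [PySem.Str.join, PySem.Chars.join, List.intercalate]
  | cons t ts ih =>
    intro s
    simp only [List.foldl_cons, List.map_cons, ih, join_empty_cons, String.append_assoc]

-- ===== VERDICT (by name: the statement is the Claim_ definition above) =====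
theorem solution_spec : Claim_equal_solution := by
  intro letter _ hpre
  show solution letter = solution_alt letter
  have hpre' : 1 ≤ PySem.Str.len letter ∧ PySem.Str.len letter ≤ 1000 := hpre
  unfold solution solution_alt
  rw [if_pos hpre', if_pos hpre']
  have hfa : (fun (answer code : String) =>
      if morseDict.contains code then answer ++ morseDict.getD code "" else answer ++ " ")
      = (fun answer code =>
          answer ++ (if morseDict.contains code then morseDict.getD code "" else " ")) := by
    funext a c; split_ifs <;> rfl
  rw [hfa, foldl_append_eq_join, String.empty_append,
    PySem.List.foldl_append_singleton_eq_map, List.nil_append]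
  congr 1
  apply List.map_congr_left
  intro code _
  have h := piece_eq code.toList
  rwa [String.ofList_toList] at h
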